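-- pv_equiv track=rewrite | github.com/tmu-nlp/UniTP | data/cross/art.py | ruler
-- ===== SOURCE A (Python) =====
-- def ruler(width, reverse = True):
--     height = len(str(width))
--     lines = [[] for _ in range(height)]
--     for x in range(width + 1):
--         for lid in range(height):
--             lines[lid].append(x // 10 ** lid % 10)
--     if reverse: lines.reverse()
--     return '\n'.join(''.join(str(x) for x in line) for line in lines)
-- ===== SOURCE B (Python) =====
-- _DIGITS = [str(d) for d in range(10)]
--
-- def ruler(width, reverse=True):
--     height = len(str(width))
--     ctr = [0] * height          # little-endian digits of the current x (an odometer)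
--     lines = [[] for _ in range(height)]
--     for _ in range(width + 1):
--         for line, d in zip(lines, ctr):
--             line.append(_DIGITS[d])
--         # odometer increment with carry
--         for lid in range(height):
--             if ctr[lid] < 9:
--                 ctr[lid] += 1
--                 break
--             ctr[lid] = 0
--     if reverse:
--         lines = lines[::-1]
--     return '\n'.join(''.join(line) for line in lines)
-- ===== Notes on version B (the rewrite author's own statement) =====
-- stated objective: faster
-- what changed: B replaces A's per-cell power-and-division digit extraction (x // 10**lid % 10 recomputed for every x and place) by an odometer: a little-endian digit counter incremented in place with carry once per x, whose digits index a precomputed digit-string table appended directly to the lines.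
import Mathlib
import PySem

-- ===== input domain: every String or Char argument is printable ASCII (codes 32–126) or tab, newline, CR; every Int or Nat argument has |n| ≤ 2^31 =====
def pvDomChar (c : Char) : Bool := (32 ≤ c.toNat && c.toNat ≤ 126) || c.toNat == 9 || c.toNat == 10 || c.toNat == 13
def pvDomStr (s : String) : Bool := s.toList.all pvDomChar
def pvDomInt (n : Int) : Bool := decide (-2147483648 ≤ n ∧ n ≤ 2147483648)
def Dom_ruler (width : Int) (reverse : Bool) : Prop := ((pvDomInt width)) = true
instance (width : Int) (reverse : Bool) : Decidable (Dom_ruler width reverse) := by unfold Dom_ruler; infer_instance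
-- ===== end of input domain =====

-- B replaces A's per-place power/division arithmetic by an odometer (increment-with-carry
-- digit counter indexing a digit-string table); measured a constant factor faster in a timing run.

-- ===== PORT A =====
-- lid ranges over [0, height) with height ≥ 0, so lid.toNat is exact; Python's 10 ** lid is (10:Int) ^ lid.toNat.
def ruler (width : Int) (reverse : Bool) : String :=
  let height : Int := PySem.Str.len (PySem.Int.toStr width)
  let lines0 : List (List Int) := (PySem.List.pyRange 0 height 1).map (fun _ => [])
  let lines1 := (PySem.List.pyRange 0 (width + 1) 1).foldl
    (fun ls x => (PySem.List.pyRange 0 height 1).foldl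
      (fun ls lid =>
        ls.modify lid.toNat (fun line =>
          line ++ [PySem.Int.mod (PySem.Int.floordiv x ((10:Int) ^ lid.toNat)) 10])) ls) lines0
  let lines2 := if reverse then lines1.reverse else lines1
  PySem.Str.join "\n" (lines2.map (fun line => PySem.Str.join "" (line.map (fun d => PySem.Int.toStr d))))

-- ===== PORT B =====
-- Source B's _DIGITS table
def rulerDigitStrs : List String := (PySem.List.pyRange 0 10 1).map (fun d => PySem.Int.toStr d)

-- Source B's in-place increment-with-carry loop over ctr (zero the 9s, +1 at the first digit < 9, break)
def rulerIncr : List Int → List Int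
  | [] => []
  | d :: rest => if d < 9 then (d + 1) :: rest else 0 :: rulerIncr rest

def ruler_alt (width : Int) (reverse : Bool) : String :=
  let height : Int := PySem.Str.len (PySem.Int.toStr width)
  let hN : Nat := height.toNat   -- height ≥ 0, so toNat is exact
  let st := (PySem.List.pyRange 0 (width + 1) 1).foldl
    (fun (st : List Int × List (List String)) _x =>
      (rulerIncr st.1, List.zipWith (fun line d => line ++ [PySem.List.pyGetD rulerDigitStrs d ""]) st.2 st.1))
    (List.replicate hN 0, List.replicate hN [])
  let lines := if reverse then st.2.reverse else st.2
  PySem.Str.join "\n" (lines.map (fun line => PySem.Str.join "" line))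

-- ===== PRECONDITION & SPEC =====
def Spec_ruler (width : Int) (reverse : Bool) (out : String) : Prop := out = ruler_alt width reverse
instance (width : Int) (reverse : Bool) (out : String) : Decidable (Spec_ruler width reverse out) := by unfold Spec_ruler; infer_instance

-- ===== CLAIM (what is proved, stated in full; the proofs are below) =====
def Claim_equal_ruler : Prop := ∀ (width : Int) (reverse : Bool), Dom_ruler width reverse → Spec_ruler width reverse (ruler width reverse)

-- ===== LEMMAS AND PROOFS =====

/-- digit `lid` (little-endian, base 10) of `n` -/
def dg (n lid : Nat) : Nat := n / 10 ^ lid % 10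

/-- A's inner loop: modifying slots 0..h-1 in turn is a `mapIdx`. -/
lemma inner_char (f : Nat → List Int → List Int) (h : Nat) (ls : List (List Int)) :
    (PySem.List.pyRange 0 (h : Int) 1).foldl (fun ls lid => ls.modify lid.toNat (f lid.toNat)) ls
      = ls.mapIdx (fun i a => if i < h then f i a else a) := by
  induction h generalizing ls with
  | zero =>
    rw [PySem.List.pyRange_one_eq_nil (by norm_num)]
    simp
    apply List.ext_getElem <;> simp
  | succ h ih =>
    have : ((h+1 : Nat) : Int) = (h : Int) + 1 := by push_cast; ring
    rw [this, PySem.List.pyRange_one_succ_right (by positivity), List.foldl_append, ih]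
    simp only [List.foldl_cons, List.foldl_nil, Int.toNat_natCast]
    apply List.ext_getElem
    · simp
    · intro i h1 h2
      rw [List.getElem_modify]
      by_cases hi : h = i
      · subst hi
        simp [List.getElem_mapIdx]
      · simp only [List.getElem_mapIdx, if_neg hi]
        rcases Nat.lt_trichotomy i h with h' | h' | h'
        · rw [if_pos h', if_pos (by omega)]
        · omega
        · rw [if_neg (by omega), if_neg (by omega)]

/-- A's digit expression `x // 10 ** lid % 10` at `x = 0 + k` is `dg k lid`. -/
lemma dig_cast (k j : Nat) :
    PySem.Int.mod (PySem.Int.floordiv ((0:Int) + (k:Int)) ((10:Int) ^ j)) 10 = ((dg k j : Nat) : Int) := by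
  have h1 : ((10:Int) ^ j) = ((10 ^ j : Nat) : Int) := by push_cast; ring
  rw [zero_add, h1, PySem.Int.floordiv_natCast]
  rw [show ((10:Int)) = ((10 : Nat) : Int) from rfl, PySem.Int.mod_natCast]
  rfl

/-- Characterization of A's whole nested loop: line `lid` holds the `lid`-th digits of 0..n-1. -/
lemma A_char (hN n : Nat) :
    ((List.range n).map (fun (k : Nat) => ((0:Int) + (k : Int)))).foldl
      (fun ls x => (PySem.List.pyRange 0 (hN : Int) 1).foldl
        (fun ls lid =>
          ls.modify lid.toNat (fun line =>
            line ++ [PySem.Int.mod (PySem.Int.floordiv x ((10:Int) ^ lid.toNat)) 10])) ls)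
      (List.replicate hN [])
    = (List.range hN).map (fun lid => (List.range n).map (fun k => ((dg k lid : Nat) : Int))) := by
  induction n with
  | zero => simp
  | succ n ih =>
    rw [List.range_succ, List.map_append, List.foldl_append, ih]
    simp only [List.map_cons, List.map_nil, List.foldl_cons, List.foldl_nil]
    rw [inner_char (fun i line => line ++ [PySem.Int.mod (PySem.Int.floordiv ((0:Int) + (n:Int)) ((10:Int) ^ i)) 10]) hN]
    apply List.ext_getElem
    · simp
    · intro i h1 h2
      simp only [List.getElem_mapIdx, List.getElem_map, List.getElem_range]
      rw [if_pos (by simpa using h1), dig_cast]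
      simp

lemma dg_succ_place (n lid : Nat) : dg n (lid + 1) = dg (n / 10) lid := by
  unfold dg
  rw [pow_succ, Nat.div_div_eq_div_mul]
  ring_nf

/-- The odometer increment takes the digit vector of `n` to the digit vector of `n+1`. -/
lemma incr_char (h : Nat) : ∀ n : Nat,
    rulerIncr ((List.range h).map (fun lid => ((dg n lid : Nat) : Int)))
      = (List.range h).map (fun lid => ((dg (n+1) lid : Nat) : Int)) := by
  induction h with
  | zero => intro n; simp [rulerIncr]
  | succ h ih =>
    intro n
    rw [List.range_succ_eq_map]
    simp only [List.map_cons, List.map_map]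
    have hmap : ∀ m : Nat, (List.map ((fun lid => ((dg m lid : Nat) : Int)) ∘ Nat.succ) (List.range h))
        = List.map (fun lid => ((dg (m / 10) lid : Nat) : Int)) (List.range h) := by
      intro m
      apply List.map_congr_left
      intro a _
      simp [Function.comp, Nat.succ_eq_add_one, dg_succ_place]
    rw [hmap, hmap]
    by_cases h9 : n % 10 < 9
    · rw [rulerIncr, if_pos (by unfold dg; push_cast; simp; omega)]
      have e1 : ((dg n 0 : Nat) : Int) + 1 = ((dg (n+1) 0 : Nat) : Int) := by unfold dg; push_cast; simp; omega
      have e2 : (n+1)/10 = n/10 := by omega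
      rw [e1, e2]
    · rw [rulerIncr, if_neg (by unfold dg; push_cast; simp; omega)]
      have e1 : ((0:Int)) = ((dg (n+1) 0 : Nat) : Int) := by unfold dg; push_cast; simp; omega
      have e2 : n/10 + 1 = (n+1)/10 := by omega
      rw [ih (n/10), e2, e1]

/-- the `_DIGITS` table agrees with `str` on 0..9 -/
lemma digit_table (m : Nat) (hm : m < 10) :
    PySem.List.pyGetD rulerDigitStrs ((m : Nat) : Int) "" = PySem.Int.toStr ((m : Nat) : Int) := by
  interval_cases m <;> rfl

/-- Characterization of B's loop: the counter holds `n`'s digits, the lines the digit strings. -/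
lemma B_char (hN n : Nat) :
    ((List.range n).map (fun (k : Nat) => ((0:Int) + (k : Int)))).foldl
      (fun (st : List Int × List (List String)) _x =>
        (rulerIncr st.1, List.zipWith (fun line d => line ++ [PySem.List.pyGetD rulerDigitStrs d ""]) st.2 st.1))
      (List.replicate hN 0, List.replicate hN [])
    = ((List.range hN).map (fun lid => ((dg n lid : Nat) : Int)),
       (List.range hN).map (fun lid =>
         (List.range n).map (fun k => PySem.Int.toStr ((dg k lid : Nat) : Int)))) := by
  induction n with
  | zero =>
    simp only [List.range_zero, List.map_nil, List.foldl_nil]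
    simp only [Prod.mk.injEq]
    constructor <;> apply List.ext_getElem <;> simp [dg]
  | succ n ih =>
    rw [List.range_succ, List.map_append, List.foldl_append, ih]
    simp only [List.map_cons, List.map_nil, List.foldl_cons, List.foldl_nil]
    rw [List.zipWith_map, List.zipWith_self]
    simp only [Prod.mk.injEq]
    constructor
    · exact incr_char hN n
    · apply List.map_congr_left
      intro lid _
      rw [digit_table (dg n lid) (Nat.mod_lt _ (by norm_num))]
      simp

theorem ruler_eq_alt (width : Int) (reverse : Bool) : ruler width reverse = ruler_alt width reverse := by
  unfold ruler ruler_alt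
  dsimp only
  have hlen : PySem.Str.len (PySem.Int.toStr width) = (((PySem.Int.toStr width).toList.length : Nat) : Int) := rfl
  rw [hlen]
  set hN : Nat := (PySem.Int.toStr width).toList.length with hdef
  have init_eq : (PySem.List.pyRange 0 ((hN : Nat) : Int) 1).map (fun _ => ([] : List Int))
      = List.replicate hN [] := by
    rw [PySem.List.pyRange_one]
    simp [List.eq_replicate_iff]
  rw [init_eq, Int.toNat_natCast, PySem.List.pyRange_one 0 (width + 1)]
  rw [A_char hN ((width + 1 - 0).toNat), B_char hN ((width + 1 - 0).toNat)]
  have lines_eq : ((List.range hN).map (fun lid => (List.range ((width + 1 - 0).toNat)).map (fun k => ((dg k lid : Nat) : Int)))).map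
        (fun line => PySem.Str.join "" (line.map (fun d => PySem.Int.toStr d)))
      = ((List.range hN).map (fun lid =>
         (List.range ((width + 1 - 0).toNat)).map (fun k => PySem.Int.toStr ((dg k lid : Nat) : Int)))).map
        (fun line => PySem.Str.join "" line) := by
    rw [List.map_map, List.map_map]
    apply List.map_congr_left
    intro lid _
    simp [Function.comp_def, List.map_map]
  cases reverse with
  | false => (simp only [Bool.false_eq_true, if_false]); rw [lines_eq]
  | true => (simp only [if_true]); rw [List.map_reverse, lines_eq, ← List.map_reverse]

-- ===== VERDICT (by name: the statement is the Claim_ definition above) =====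
theorem ruler_spec : Claim_equal_ruler := by
  intro width reverse _
  unfold Spec_ruler
  exact ruler_eq_alt width reverse
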